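-- pv_equiv track=rewrite | github.com/umop-ap1sdn/ECE461P-FinalProject | gru_model/dataset_creator.py | lagging_series
-- ===== SOURCE A (Python) =====
-- def lagging_series(column, size):
--     lagging = []
--     target_column = []
--     for i in range(1, size + 1):
--         new_column = []
--         for j in range(size, len(column)):
--             if i == 1:
--                 target_column.append(column[j])
--             new_column.append(column[j - i])
--         lagging.append(new_column)
--
--     return lagging, target_column
-- ===== SOURCE B (Python) =====
-- def lagging_series(column, size):
--     n = len(column)
--     lagging = [list(column[size - i: max(n - i, 0)]) for i in range(1, size + 1)]
--     target_column = list(column[size:]) if size >= 1 else []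
--     return lagging, target_column
-- ===== Notes on version B (the rewrite author's own statement) =====
-- stated objective: simpler
-- what changed: Replaces A's nested index loops (outer over lags, inner over row indices with per-element appends and an if-guarded target accumulation) by direct slicing: each lag column is the slice column[size-i : max(len-i,0)] built in a comprehension, and the target is the slice column[size:].
import Mathlib
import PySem

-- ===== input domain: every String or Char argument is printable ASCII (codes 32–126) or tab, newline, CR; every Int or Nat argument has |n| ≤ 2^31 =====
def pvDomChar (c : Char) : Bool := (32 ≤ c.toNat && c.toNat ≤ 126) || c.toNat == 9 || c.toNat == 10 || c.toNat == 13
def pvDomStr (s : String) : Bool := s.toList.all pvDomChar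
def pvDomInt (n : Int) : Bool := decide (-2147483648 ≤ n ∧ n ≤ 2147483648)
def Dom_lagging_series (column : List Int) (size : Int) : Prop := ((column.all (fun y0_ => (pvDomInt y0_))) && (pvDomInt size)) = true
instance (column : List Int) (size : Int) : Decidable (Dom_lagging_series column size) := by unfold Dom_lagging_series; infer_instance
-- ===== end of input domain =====

-- B replaces A's nested index loops by direct slicing: each lag column is the slice
-- column[size-i : max(len-i, 0)] and the target is the slice column[size:] (objective: simpler).

-- ===== PORT A =====
-- literal transliteration: outer loop over i in range(1, size+1) carrying (lagging, target_column),
-- inner loop over j in range(size, len(column)) carrying (new_column, target_column);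
-- all indexed accesses are in range, so pyGetD with default 0 is exact.
def lagging_series (column : List Int) (size : Int) : List (List Int) × List Int :=
  (PySem.List.pyRange 1 (size + 1) 1).foldl
    (fun (st : List (List Int) × List Int) i =>
      let inner :=
        (PySem.List.pyRange size (column.length : Int) 1).foldl
          (fun (st2 : List Int × List Int) j =>
            (st2.1 ++ [PySem.List.pyGetD column (j - i) 0],
             if i = 1 then st2.2 ++ [PySem.List.pyGetD column j 0] else st2.2))
          ([], st.2)
      (st.1 ++ [inner.1], inner.2))
    ([], [])

-- ===== PORT B =====
def lagging_series_alt (column : List Int) (size : Int) : List (List Int) × List Int :=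
  ((PySem.List.pyRange 1 (size + 1) 1).map
      (fun i => PySem.List.slice column
        (some (size - i)) (some (max ((column.length : Int) - i) 0))),
   if 1 ≤ size then PySem.List.slice column (some size) none else [])

-- ===== PRECONDITION & SPEC =====
def Spec_lagging_series (column : List Int) (size : Int) (out : List (List Int) × List Int) : Prop := out = lagging_series_alt column size
instance (column : List Int) (size : Int) (out : List (List Int) × List Int) : Decidable (Spec_lagging_series column size out) := by unfold Spec_lagging_series; infer_instance

-- ===== CLAIM (what is proved, stated in full; the proofs are below) =====
def Claim_equal_lagging_series : Prop := ∀ (column : List Int) (size : Int), Dom_lagging_series column size → Spec_lagging_series column size (lagging_series column size)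

-- ===== LEMMAS AND PROOFS =====

-- a pair-state foldl whose components do not interact splits into two foldls
theorem foldl_pair {α β γ : Type} (l : List γ) (f : α → γ → α) (g : β → γ → β)
    (x : α) (y : β) :
    l.foldl (fun st j => (f st.1 j, g st.2 j)) (x, y) = (l.foldl f x, l.foldl g y) := by
  induction l generalizing x y with
  | nil => rfl
  | cons a t ih => simpa using ih (f x a) (g y a)

-- shifting the index of a mapped range
theorem map_range_shift {α : Type} (f : Int → α) (a b d : Int) :
    (PySem.List.pyRange a b 1).map (fun j => f (j - d)) =
      (PySem.List.pyRange (a - d) (b - d) 1).map f := by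
  rw [PySem.List.pyRange_one, PySem.List.pyRange_one]
  simp only [List.map_map]
  have h : (b - a).toNat = (b - d - (a - d)).toNat := by omega
  rw [← h]
  exact List.map_congr_left (fun k _ => by simp [Function.comp]; ring_nf)

-- a range of in-bounds gets is a slice
theorem map_pyGetD_eq_slice (xs : List Int) (a b : Int) (ha : 0 ≤ a) (hb : b ≤ (xs.length : Int)) :
    (PySem.List.pyRange a b 1).map (fun j => PySem.List.pyGetD xs j 0) =
      PySem.List.slice xs (some a) (some (max b 0)) := by
  rw [PySem.List.slice_toNat (ha := ha) (hb := by omega), PySem.List.pyRange_one]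
  simp only [List.map_map]
  apply List.ext_getElem
  · simp
    omega
  · intro k hk1 hk2
    simp only [List.length_map, List.length_range] at hk1
    simp only [List.getElem_map, List.getElem_range, Function.comp]
    rw [List.getElem_take, List.getElem_drop]
    rw [PySem.List.pyGetD_of_nonneg (h := by omega)]
    have hlt : (a + (k : Int)).toNat < xs.length := by omega
    rw [List.getD_eq_getElem _ _ hlt]
    congr 1
    omega

-- the if-accumulator of the outer loop: once past i = 1 nothing changes
theorem foldl_if_one_const {β : Type} (l : List Int) (T : List β → List β) (y : List β)
    (h : ∀ i ∈ l, i ≠ 1) :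
    l.foldl (fun acc i => if i = 1 then T acc else acc) y = y := by
  induction l with
  | nil => rfl
  | cons a t ih =>
    simp only [List.foldl_cons, if_neg (h a (by simp))]
    exact ih (fun i hi => h i (by simp [hi]))

-- ===== VERDICT (by name: the statement is the Claim_ definition above) =====
theorem lagging_series_spec : Claim_equal_lagging_series := by
  intro column size _
  unfold Spec_lagging_series lagging_series lagging_series_alt
  -- Step 1: replace each outer-loop body (for i with 1 ≤ i ≤ size) by its closed form.
  have hstep :
      (PySem.List.pyRange 1 (size + 1) 1).foldl
        (fun (st : List (List Int) × List Int) i =>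
          let inner :=
            (PySem.List.pyRange size ((column.length : Int)) 1).foldl
              (fun (st2 : List Int × List Int) j =>
                (st2.1 ++ [PySem.List.pyGetD column (j - i) 0],
                 if i = 1 then st2.2 ++ [PySem.List.pyGetD column j 0] else st2.2))
              ([], st.2)
          (st.1 ++ [inner.1], inner.2)) ([], []) =
      (PySem.List.pyRange 1 (size + 1) 1).foldl
        (fun (st : List (List Int) × List Int) i =>
          (st.1 ++ [(PySem.List.pyRange size ((column.length : Int)) 1).map
                      (fun j => PySem.List.pyGetD column (j - i) 0)],
           if i = 1 then st.2 ++ column.drop size.toNat else st.2)) ([], []) := by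
    apply PySem.List.foldl_congr_mem
    intro st i hi
    have hmem := (PySem.List.mem_pyRange_one).mp hi
    simp only
    rw [foldl_pair (PySem.List.pyRange size ((column.length : Int)) 1)
        (fun (x : List Int) j => x ++ [PySem.List.pyGetD column (j - i) 0])
        (fun (y : List Int) j => if i = 1 then y ++ [PySem.List.pyGetD column j 0] else y)
        [] st.2]
    simp only [Prod.mk.injEq]
    constructor
    · rw [PySem.List.foldl_append_singleton_eq_map, List.nil_append]
    · by_cases h1 : i = 1
      · subst h1
        simp only [if_pos trivial]
        rw [PySem.List.foldl_append_singleton_eq_map]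
        congr 1
        have hlen : ((column.length : Int)) = PySem.List.len column := by simp [PySem.List.len]
        rw [hlen]
        exact PySem.List.map_pyGetD_pyRange column 0 (by omega)
      · simp only [if_neg h1]
        generalize st.2 = y
        induction (PySem.List.pyRange size ((column.length : Int)) 1) generalizing y with
        | nil => rfl
        | cons a t ih => simp only [List.foldl_cons]; exact ih y
  rw [hstep, foldl_pair (PySem.List.pyRange 1 (size + 1) 1)
      (fun (x : List (List Int)) i => x ++ [(PySem.List.pyRange size ((column.length : Int)) 1).map
          (fun j => PySem.List.pyGetD column (j - i) 0)])
      (fun (y : List Int) i => if i = 1 then y ++ column.drop size.toNat else y)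
      [] []]
  refine Prod.ext ?_ ?_
  · -- lagging component: appended singletons = map, then each column is a slice
    simp only
    rw [PySem.List.foldl_append_singleton_eq_map, List.nil_append]
    refine List.map_congr_left ?_
    intro i hi
    have hmem := (PySem.List.mem_pyRange_one).mp hi
    rw [map_range_shift (fun j => PySem.List.pyGetD column j 0) size ((column.length : Int)) i,
        map_pyGetD_eq_slice column (size - i) (((column.length : Int)) - i) (by omega) (by omega)]
  · -- target component
    simp only
    by_cases hs : 1 ≤ size
    · rw [if_pos hs, PySem.List.pyRange_one_cons (by omega)]
      simp only [List.foldl_cons, if_pos trivial, List.nil_append]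
      rw [foldl_if_one_const _ _ _
          (fun i hi => by have := (PySem.List.mem_pyRange_one).mp hi; omega)]
      rw [PySem.List.slice_from (ha := by omega)]
    · rw [if_neg hs, PySem.List.pyRange_one_eq_nil (by omega)]
      rfl
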